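-- pv_equiv track=rewrite | github.com/smullins7/advent-of-code | 2024/day_7.py | part_one
-- ===== SOURCE A (Python) =====
-- from functools import reduce
-- from itertools import product
--
-- def part_one(data):
--     total = 0
--     for (result, parts) in data:
--         for ops in product([lambda a, b: a + b, lambda a, b: a * b], repeat=len(parts) - 1):
--             ops = list(ops)
--             if reduce(lambda a, b: ops.pop(0)(a, b), parts) == result:
--                 total += result
--                 break
--
--     return total
-- ===== SOURCE B (Python) =====
-- def part_one(data):
--     total = 0
--     for result, parts in data:
--         vals = {parts[0]}
--         for p in parts[1:]:
--             vals = {v + p for v in vals} | {v * p for v in vals}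
--         if result in vals:
--             total += result
--     return total
-- ===== Notes on version B (the rewrite author's own statement) =====
-- stated objective: faster
-- what changed: Instead of enumerating all 2^(n-1) operator tuples and re-running reduce over the whole list for each (O(n*2^n) per equation), B sweeps the parts once left-to-right maintaining the SET of reachable partial values, deduplicating as it goes, and checks membership of the target at the end.
import Mathlib
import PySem

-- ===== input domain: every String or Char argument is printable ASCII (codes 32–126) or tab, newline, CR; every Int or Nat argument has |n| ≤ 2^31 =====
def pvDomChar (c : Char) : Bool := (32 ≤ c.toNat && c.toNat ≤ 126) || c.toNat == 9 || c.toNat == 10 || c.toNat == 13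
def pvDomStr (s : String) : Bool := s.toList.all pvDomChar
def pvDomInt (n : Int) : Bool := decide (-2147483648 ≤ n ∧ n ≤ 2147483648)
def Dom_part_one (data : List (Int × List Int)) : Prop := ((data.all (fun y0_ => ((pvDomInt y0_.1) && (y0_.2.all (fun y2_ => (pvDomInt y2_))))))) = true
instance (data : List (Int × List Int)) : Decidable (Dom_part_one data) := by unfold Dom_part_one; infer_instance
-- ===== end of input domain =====

-- B replaces A's enumeration of all operator tuples by a single left-to-right sweep
-- maintaining the deduplicated set of reachable partial values (faster).
-- Pre_ excludes pairs with an empty parts list, on which both Pythons raise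
-- (A: ValueError from product(repeat=-1); B: IndexError from parts[0]).


-- ===== PORT A =====
-- itertools.product([+, *], repeat=n): an op is a Bool (false = +, true = *);
-- leftmost position varies slowest, '+' before '*', exactly product's order.
def prodOps : Nat → List (List Bool)
  | 0 => [[]]
  | n + 1 => (prodOps n).map (false :: ·) ++ (prodOps n).map (true :: ·)

-- reduce(lambda a, b: ops.pop(0)(a, b), parts) with accumulator a, remaining parts, remaining ops
def evalOps : Int → List Int → List Bool → Int
  | a, [], _ => a
  | a, _, [] => a            -- unreachable in A: ops and parts.tail have equal length
  | a, b :: bs, op :: ops => evalOps (if op then a * b else a + b) bs ops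

-- the inner 'for ops in product(...): if … == result: total += result; break'
-- (break after the first success ⇒ the loop contributes result iff SOME tuple matches)
def part_one (data : List (Int × List Int)) : Int :=
  data.foldl (fun total rp =>
    match rp with
    | (_, []) => total       -- unreachable under Pre_: Python raises here
    | (r, p :: ps) =>
        if (prodOps ps.length).any (fun ops => evalOps p ps ops == r)
        then total + r else total) 0

-- ===== PORT B =====
-- vals = {v + p for v in vals} | {v * p for v in vals}
def stepVals (s : PySem.Set Int) (q : Int) : PySem.Set Int :=
  PySem.Set.ofList (s.map (· + q) ++ s.map (· * q))

def part_one_alt (data : List (Int × List Int)) : Int :=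
  data.foldl (fun total rp =>
    match rp with
    | (_, []) => total       -- unreachable under Pre_: Python raises here
    | (r, p :: ps) =>
        if (ps.foldl stepVals (PySem.Set.ofList [p])).contains r
        then total + r else total) 0

-- ===== PRECONDITION & SPEC =====
-- Pre_: every equation has a nonempty parts list; on an empty one Python A raises
-- ValueError (product with repeat=-1) and Python B raises IndexError (parts[0]).
def Pre_part_one (data : List (Int × List Int)) : Prop :=
  ∀ rp ∈ data, rp.2 ≠ []
instance (data : List (Int × List Int)) : Decidable (Pre_part_one data) := by
  unfold Pre_part_one; infer_instance

def pvWitness_part_one : (List (Int × List Int)) := [(5, [2, 3]), (7, [2, 3, 1])]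

def Spec_part_one (data : List (Int × List Int)) (out : Int) : Prop := out = part_one_alt data
instance (data : List (Int × List Int)) (out : Int) : Decidable (Spec_part_one data out) := by
  unfold Spec_part_one; infer_instance

-- ===== CLAIM (what is proved, stated in full; the proofs are below) =====
def Claim_equal_part_one : Prop :=
  ∀ (data : List (Int × List Int)), Dom_part_one data → Pre_part_one data →
    Spec_part_one data (part_one data)

-- ===== LEMMAS AND PROOFS =====

-- membership in one dedup step
lemma mem_stepVals (s : PySem.Set Int) (q x : Int) :
    x ∈ stepVals s q ↔ ∃ v ∈ s, x = v + q ∨ x = v * q := by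
  simp [stepVals, PySem.Set.mem_ofList]
  constructor
  · rintro (⟨v, hv, rfl⟩ | ⟨v, hv, rfl⟩) <;> exact ⟨v, hv, by simp⟩
  · rintro ⟨v, hv, rfl | rfl⟩
    · exact Or.inl ⟨v, hv, rfl⟩
    · exact Or.inr ⟨v, hv, rfl⟩

-- the reachable-set sweep computes exactly the values of all operator tuples
lemma mem_foldl_stepVals (ps : List Int) (s : PySem.Set Int) (r : Int) :
    r ∈ ps.foldl stepVals s ↔ ∃ v ∈ s, ∃ ops ∈ prodOps ps.length, evalOps v ps ops = r := by
  induction ps generalizing s with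
  | nil => simp [prodOps, evalOps]
  | cons q ps ih =>
      simp only [List.foldl_cons, ih, prodOps, List.length_cons]
      constructor
      · rintro ⟨v, hv, ops, hops, hev⟩
        rw [mem_stepVals] at hv
        obtain ⟨w, hw, rfl | rfl⟩ := hv
        · exact ⟨w, hw, false :: ops, by simp [hops], by simpa [evalOps] using hev⟩
        · exact ⟨w, hw, true :: ops, by simp [hops], by simpa [evalOps] using hev⟩
      · rintro ⟨v, hv, ops, hops, hev⟩
        simp only [List.mem_append, List.mem_map] at hops
        obtain ⟨t, ht, rfl⟩ | ⟨t, ht, rfl⟩ := hops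
        · exact ⟨v + q, (mem_stepVals s q _).2 ⟨v, hv, Or.inl rfl⟩, t, ht,
            by simpa [evalOps] using hev⟩
        · exact ⟨v * q, (mem_stepVals s q _).2 ⟨v, hv, Or.inr rfl⟩, t, ht,
            by simpa [evalOps] using hev⟩

-- the two per-equation tests agree
lemma test_eq (r p : Int) (ps : List Int) :
    (ps.foldl stepVals (PySem.Set.ofList [p])).contains r
      = (prodOps ps.length).any (fun ops => evalOps p ps ops == r) := by
  simp only [PySem.Set.contains, List.contains_eq_mem, List.any_eq, decide_eq_decide,
    mem_foldl_stepVals, PySem.Set.mem_ofList]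
  constructor
  · rintro ⟨v, hv, ops, hops, hev⟩
    rw [List.mem_singleton] at hv
    subst hv
    exact ⟨ops, hops, by simp [hev]⟩
  · rintro ⟨ops, hops, hev⟩
    exact ⟨p, List.mem_singleton.2 rfl, ops, hops, by simpa using hev⟩

-- ===== VERDICT (by name: the statement is the Claim_ definition above) =====
theorem part_one_spec : Claim_equal_part_one := by
  intro data _ _
  unfold Spec_part_one part_one part_one_alt
  congr 1
  funext total rp
  obtain ⟨r, _ | ⟨p, ps⟩⟩ := rp
  · rfl
  · simp only [test_eq]
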